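-- pv_equiv track=rewrite | github.com/shankar-1403/pcred_financial_analyzer | backend/banks/boi.py | _detect_columns_boi
-- ===== SOURCE A (Python) =====
-- HEADER_MAP = {
--     "sno":         ["sno", "si no", "sl no", "sr no"],
--     "date":        ["tran date", "txn date", "transaction date", "date"],
--     "description": ["description", "narration", "particulars"],
--     "cheque":      ["cheque no", "chq no", "cheque number", "ref no", "inst no"],
--     "debit":       ["debits", "debit", "withdrawal (in rs.)", "withdrawal", "dr"],
--     "credit":      ["credits", "credit", "deposits (in rs.)", "deposits", "deposit", "cr"],
--     "balance":     ["balance (in rs.)", "balance", "running balance"],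
-- }
--
-- def _detect_columns_boi(row_clean):
--     mapping = {}
--
--     for field, variants in HEADER_MAP.items():
--         # Pass 1: exact cell match
--         for idx, cell in enumerate(row_clean):
--             if cell in variants:
--                 mapping[field] = idx
--                 break
--         if field in mapping:
--             continue
--
--         # Pass 2: alias contained in cell, alias must be ≥4 chars
--         for idx, cell in enumerate(row_clean):
--             if any(len(v) >= 4 and v in cell for v in variants):
--                 mapping[field] = idx
--                 break
--
--     # Need at least date + one amount column to be valid
--     return mapping if ("date" in mapping and
--                        ("debit" in mapping or "credit" in mapping)) else None
-- ===== SOURCE B (Python) =====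
-- HEADER_MAP = {
--     "sno":         ["sno", "si no", "sl no", "sr no"],
--     "date":        ["tran date", "txn date", "transaction date", "date"],
--     "description": ["description", "narration", "particulars"],
--     "cheque":      ["cheque no", "chq no", "cheque number", "ref no", "inst no"],
--     "debit":       ["debits", "debit", "withdrawal (in rs.)", "withdrawal", "dr"],
--     "credit":      ["credits", "credit", "deposits (in rs.)", "deposits", "deposit", "cr"],
--     "balance":     ["balance (in rs.)", "balance", "running balance"],
-- }
--
-- def _detect_columns_boi(row_clean):
--     # one scan: earliest index of each distinct cell value
--     seen = {}
--     for i, cell in enumerate(row_clean):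
--         seen.setdefault(cell, i)
--
--     mapping = {}
--     for field, variants in HEADER_MAP.items():
--         hits = [seen[v] for v in variants if v in seen]
--         if hits:
--             mapping[field] = min(hits)
--         else:
--             hit = next((idx for idx, cell in enumerate(row_clean)
--                         if any(len(v) >= 4 and v in cell for v in variants)), None)
--             if hit is not None:
--                 mapping[field] = hit
--
--     return mapping if ("date" in mapping and
--                        ("debit" in mapping or "credit" in mapping)) else None
-- ===== Notes on version B (the rewrite author's own statement) =====
-- stated objective: idiomatic
-- what changed: B replaces A's per-field first-match scan over the row (pass 1) by a single enumerate scan building an earliest-index dict of cell values, then takes the minimum index over each field's present variants; the substring pass becomes a next(...) over a generator only for fields still unmatched.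
import Mathlib
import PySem

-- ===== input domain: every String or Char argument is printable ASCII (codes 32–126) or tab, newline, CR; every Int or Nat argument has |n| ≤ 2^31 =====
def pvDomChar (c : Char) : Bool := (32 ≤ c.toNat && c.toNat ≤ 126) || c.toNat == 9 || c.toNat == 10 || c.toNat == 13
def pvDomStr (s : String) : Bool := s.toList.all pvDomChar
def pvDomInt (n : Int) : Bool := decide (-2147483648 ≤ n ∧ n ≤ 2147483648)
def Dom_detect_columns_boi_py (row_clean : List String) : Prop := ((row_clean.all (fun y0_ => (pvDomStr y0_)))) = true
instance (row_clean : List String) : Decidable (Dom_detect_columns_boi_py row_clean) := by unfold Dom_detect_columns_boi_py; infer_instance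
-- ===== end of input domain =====

-- B builds an earliest-index dict of cell values in one scan and takes the min index over each
-- field's present variants, instead of A's per-field first-match scan over the row; idiomatic.

-- ===== PORT A =====
def headerMapPy : List (String × List String) :=
  [ ("sno",         ["sno", "si no", "sl no", "sr no"]),
    ("date",        ["tran date", "txn date", "transaction date", "date"]),
    ("description", ["description", "narration", "particulars"]),
    ("cheque",      ["cheque no", "chq no", "cheque number", "ref no", "inst no"]),
    ("debit",       ["debits", "debit", "withdrawal (in rs.)", "withdrawal", "dr"]),
    ("credit",      ["credits", "credit", "deposits (in rs.)", "deposits", "deposit", "cr"]),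
    ("balance",     ["balance (in rs.)", "balance", "running balance"]) ]

-- pass 1: first idx with cell in variants (break → option-returning recursion)
def pyExactScan (variants : List String) : List String → Int → Option Int
  | [], _ => none
  | cell :: rest, idx =>
    if variants.contains cell then some idx else pyExactScan variants rest (idx + 1)

-- any(len(v) >= 4 and v in cell for v in variants)
def pySubHit (variants : List String) (cell : String) : Bool :=
  variants.any (fun v => decide (4 ≤ PySem.Str.len v) && PySem.Str.isIn v cell)

-- pass 2: first idx whose cell contains a variant of length ≥ 4
def pySubScan (variants : List String) : List String → Int → Option Int
  | [], _ => none
  | cell :: rest, idx =>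
    if pySubHit variants cell then some idx else pySubScan variants rest (idx + 1)

def detect_columns_boi_py (row_clean : List String) : Option (List (String × Int)) :=
  let mapping : PySem.Dict String Int :=
    headerMapPy.foldl (fun m fv =>
      match pyExactScan fv.2 row_clean 0 with
      | some i => m.insert fv.1 i
      | none =>
        match pySubScan fv.2 row_clean 0 with
        | some i => m.insert fv.1 i
        | none => m) PySem.Dict.empty
  if mapping.contains "date" && (mapping.contains "debit" || mapping.contains "credit")
  then some mapping.items else none

-- ===== PORT B =====
-- seen: earliest index of each distinct cell value (setdefault in one enumerate scan)
def altSeen : List String → Int → PySem.Dict String Int → PySem.Dict String Int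
  | [], _, d => d
  | cell :: rest, i, d => altSeen rest (i + 1) (d.setdefault cell i)

-- next((idx for idx, cell in enumerate(row) if any(len(v)>=4 and v in cell ...)), None)
def altSubScan (variants : List String) (row : List String) : Option Int :=
  (row.findIdx? (fun cell =>
      variants.any (fun v => decide (4 ≤ PySem.Str.len v) && PySem.Str.isIn v cell))).map
    (fun n => (n : Int))

def detect_columns_boi_py_alt (row_clean : List String) : Option (List (String × Int)) :=
  let seen := altSeen row_clean 0 PySem.Dict.empty
  let mapping : PySem.Dict String Int :=
    headerMapPy.foldl (fun m fv =>
      let hits := fv.2.filterMap (fun v => seen.get? v)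
      match PySem.List.min? hits (fun x => x) with
      | some i => m.insert fv.1 i
      | none =>
        match altSubScan fv.2 row_clean with
        | some i => m.insert fv.1 i
        | none => m) PySem.Dict.empty
  if mapping.contains "date" && (mapping.contains "debit" || mapping.contains "credit")
  then some mapping.items else none

-- ===== PRECONDITION & SPEC =====
def Spec_detect_columns_boi_py (row_clean : List String) (out : Option (List (String × Int))) : Prop := out = detect_columns_boi_py_alt row_clean
instance (row_clean : List String) (out : Option (List (String × Int))) : Decidable (Spec_detect_columns_boi_py row_clean out) := by unfold Spec_detect_columns_boi_py; infer_instance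

-- ===== CLAIM (what is proved, stated in full; the proofs are below) =====
def Claim_equal_detect_columns_boi_py : Prop := ∀ (row_clean : List String), Dom_detect_columns_boi_py row_clean → Spec_detect_columns_boi_py row_clean (detect_columns_boi_py row_clean)

-- ===== LEMMAS AND PROOFS =====

-- pointwise min on Option Nat / Option Int (none = +∞)
def ominN : Option Nat → Option Nat → Option Nat
  | none, b => b
  | some a, none => some a
  | some a, some b => some (min a b)

def ominI : Option Int → Option Int → Option Int
  | none, b => b
  | some a, none => some a
  | some a, some b => some (min a b)

-- generic offset form of a break-scan
theorem scan_eq_findIdx (p : String → Bool)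
    (f : List String → Int → Option Int)
    (hf : ∀ cell rest idx, f (cell :: rest) idx =
        if p cell then some idx else f rest (idx + 1))
    (hnil : ∀ idx, f [] idx = none) :
    ∀ (row : List String) (idx : Int),
      f row idx = (row.findIdx? p).map (fun n => idx + (n : Int)) := by
  intro row
  induction row with
  | nil => intro idx; simp [hnil]
  | cons c rest ih =>
    intro idx
    rw [hf, List.findIdx?_cons]
    by_cases h : p c
    · simp [h]
    · simp only [h, if_neg, Bool.false_eq_true, ↓reduceIte, ih (idx + 1), Option.map_map]
      cases rest.findIdx? p <;> simp <;> omega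

theorem pySubScan_eq (variants : List String) (row : List String) :
    pySubScan variants row 0 = altSubScan variants row := by
  rw [scan_eq_findIdx (pySubHit variants) (pySubScan variants)
      (fun _ _ _ => rfl) (fun _ => rfl) row 0]
  unfold altSubScan
  have hp : (fun cell => variants.any
      (fun v => decide (4 ≤ PySem.Str.len v) && PySem.Str.isIn v cell)) = pySubHit variants := rfl
  rw [hp]
  cases List.findIdx? (pySubHit variants) row with
  | none => rfl
  | some n => show some (0 + (n : Int)) = some (n : Int); rw [Int.zero_add]

theorem findIdx?_false (row : List String) :
    row.findIdx? (fun _ => false) = none := by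
  induction row with
  | nil => rfl
  | cons c rest ih => simp [List.findIdx?_cons, ih]

theorem findIdx?_or (p q : String → Bool) (row : List String) :
    row.findIdx? (fun c => p c || q c) = ominN (row.findIdx? p) (row.findIdx? q) := by
  induction row with
  | nil => rfl
  | cons c rest ih =>
    simp only [List.findIdx?_cons, ih]
    by_cases hp : p c
    · by_cases hq : q c <;>
        simp [hp, hq, ominN] <;> cases rest.findIdx? q <;> simp [ominN]
    · by_cases hq : q c
      · simp only [hp, hq, Bool.false_or, ↓reduceIte]
        cases rest.findIdx? p <;> simp [ominN]
      · simp only [hp, hq, Bool.false_or, ↓reduceIte]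
        cases h1 : rest.findIdx? p <;> cases h2 : rest.findIdx? q <;>
          simp [ominN, Nat.min_def] <;> split <;> omega

theorem findIdx?_contains (variants : List String) (row : List String) :
    row.findIdx? (fun c => variants.contains c) =
      variants.foldr (fun v acc => ominN (row.findIdx? (fun c => c == v)) acc) none := by
  induction variants with
  | nil => simpa using findIdx?_false row
  | cons v vs ih =>
    have : (fun c => (v :: vs).contains c) = fun c => (c == v) || vs.contains c := by
      funext c; by_cases h : c = v <;> simp [h]
    rw [this, findIdx?_or, ih, List.foldr_cons]

-- altSeen lookup = findIdx? of the value, offset by the start index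
theorem altSeen_get? (row : List String) :
    ∀ (i : Int) (d : PySem.Dict String Int) (v : String),
      (altSeen row i d).get? v =
        match d.get? v with
        | some x => some x
        | none => (row.findIdx? (fun c => c == v)).map (fun n => i + (n : Int)) := by
  induction row with
  | nil =>
    intro i d v
    show d.get? v = _
    cases d.get? v <;> rfl
  | cons c rest ih =>
    intro i d v
    show (altSeen rest (i + 1) (d.setdefault c i)).get? v = _
    rw [ih]
    by_cases hvc : v = c
    · subst hvc
      rw [PySem.Dict.get?_setdefault_self]
      cases hd : d.get? v with
      | some x => simp [hd, List.findIdx?_cons]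
      | none => simp [hd, List.findIdx?_cons]
    · rw [PySem.Dict.get?_setdefault_of_ne d i hvc]
      have hcv : (c == v) = false := beq_eq_false_iff_ne.mpr (fun h => hvc h.symm)
      cases hd : d.get? v with
      | some x => rfl
      | none =>
        simp only [List.findIdx?_cons, hcv, Bool.false_eq_true, ↓reduceIte, Option.map_map]
        cases rest.findIdx? (fun c => c == v) with
        | none => rfl
        | some n =>
          show some (i + 1 + (n : Int)) = some (i + ((n : Int) + 1))
          rw [Int.add_assoc, Int.add_comm 1]

-- foldl min over Int
theorem foldl_min_min (l : List Int) : ∀ a b : Int,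
    l.foldl min (min a b) = min a (l.foldl min b) := by
  induction l with
  | nil => intro a b; rfl
  | cons c t ih =>
    intro a b
    simp only [List.foldl_cons, min_assoc, ih]

theorem min?_id_eq_foldr (os : List (Option Int)) :
    PySem.List.min? (os.filterMap (fun o => o)) (fun x => x) = os.foldr ominI none := by
  induction os with
  | nil => rfl
  | cons o os ih =>
    cases o with
    | none => exact ih
    | some a =>
      show PySem.List.min? (a :: os.filterMap (fun o => o)) (fun x => x)
          = ominI (some a) (os.foldr ominI none)
      rw [← ih, PySem.List.min?_id_cons]
      cases h : os.filterMap (fun o => o) with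
      | nil => rfl
      | cons b t =>
        rw [PySem.List.min?_id_cons]
        show some (List.foldl min a (b :: t)) = some (min a (List.foldl min b t))
        rw [List.foldl_cons, foldl_min_min]

-- cast a Nat-level foldr of ominN to Int level
theorem foldr_omin_cast (l : List (Option Nat)) :
    (l.map (fun o => o.map (fun n => (n : Int)))).foldr ominI none =
      (l.foldr ominN none).map (fun n => (n : Int)) := by
  induction l with
  | nil => rfl
  | cons o l ih =>
    simp only [List.map_cons, List.foldr_cons, ih]
    cases o <;> cases l.foldr ominN none <;> simp [ominI, ominN, Nat.cast_min]

-- the key per-field fact: A's exact pass = min over B's seen-dict lookups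
theorem exact_eq (variants row : List String) :
    pyExactScan variants row 0 =
      PySem.List.min?
        (variants.filterMap (fun v => (altSeen row 0 PySem.Dict.empty).get? v))
        (fun x => x) := by
  have hseen : (fun v => (altSeen row 0 PySem.Dict.empty).get? v) =
      (fun v => (row.findIdx? (fun c => c == v)).map (fun n => (n : Int))) := by
    funext v
    rw [altSeen_get? row 0 PySem.Dict.empty v]
    rw [PySem.Dict.get?_empty]
    cases row.findIdx? (fun c => c == v) with
    | none => rfl
    | some n => show some (0 + (n : Int)) = some (n : Int); rw [Int.zero_add]
  rw [hseen]
  have hfm : variants.filterMap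
        (fun v => (row.findIdx? (fun c => c == v)).map (fun n => (n : Int))) =
      (variants.map (fun v =>
        (row.findIdx? (fun c => c == v)).map (fun n => (n : Int)))).filterMap (fun o => o) := by
    rw [List.filterMap_map]; rfl
  rw [hfm, min?_id_eq_foldr]
  have e1 : variants.map (fun v =>
        (row.findIdx? (fun c => c == v)).map (fun n => (n : Int))) =
      (variants.map (fun v => row.findIdx? (fun c => c == v))).map
        (fun o => o.map (fun n => (n : Int))) := by
    rw [List.map_map]; rfl
  rw [e1, foldr_omin_cast, List.foldr_map, ← findIdx?_contains,
    scan_eq_findIdx (fun c => variants.contains c) (pyExactScan variants)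
      (fun _ _ _ => rfl) (fun _ => rfl) row 0]
  cases row.findIdx? (fun c => variants.contains c) with
  | none => rfl
  | some n => show some (0 + (n : Int)) = some (n : Int); rw [Int.zero_add]

-- ===== VERDICT (by name: the statement is the Claim_ definition above) =====
theorem detect_columns_boi_py_spec : Claim_equal_detect_columns_boi_py := by
  intro row _
  show detect_columns_boi_py row = detect_columns_boi_py_alt row
  unfold detect_columns_boi_py detect_columns_boi_py_alt
  have hstep : (fun (m : PySem.Dict String Int) (fv : String × List String) =>
      match pyExactScan fv.2 row 0 with
      | some i => m.insert fv.1 i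
      | none =>
        match pySubScan fv.2 row 0 with
        | some i => m.insert fv.1 i
        | none => m) =
      (fun (m : PySem.Dict String Int) fv =>
        let hits := fv.2.filterMap (fun v => (altSeen row 0 PySem.Dict.empty).get? v)
        match PySem.List.min? hits (fun x => x) with
        | some i => m.insert fv.1 i
        | none =>
          match altSubScan fv.2 row with
          | some i => m.insert fv.1 i
          | none => m) := by
    funext m fv
    simp only [← exact_eq, ← pySubScan_eq]
  simp only [hstep]
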